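-- pv_equiv track=rewrite | github.com/MasterOfMastersDestoyerOfWorlds/Blender-Procedural-Human | procedural_human/decorators/curve_preset_decorator.py | build_profile_name_chain
-- ===== SOURCE A (Python) =====
-- from typing import Optional
--
-- def build_profile_name_chain(
--     context_chain: list,
--     component: str,
--     index: Optional[int] = None,
--     axis: str = "X"
-- ) -> list:
--     """Build a chain of profile names for fallback resolution."""
--     names = []
--
--     index_suffix = f"_{index}" if index is not None else ""
--     axis_suffix = f"_{axis}"
--
--     for i in range(len(context_chain) + 1):
--         prefix_parts = context_chain[i:]
--         if prefix_parts:
--             prefix = "_".join(prefix_parts) + "_"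
--         else:
--             prefix = ""
--
--         name = f"{prefix}{component}{index_suffix}{axis_suffix}"
--         names.append(name)
--
--     return names
-- ===== SOURCE B (Python) =====
-- from typing import Optional
--
-- def build_profile_name_chain(
--     context_chain: list,
--     component: str,
--     index: Optional[int] = None,
--     axis: str = "X"
-- ) -> list:
--     """Build a chain of profile names for fallback resolution."""
--     index_suffix = f"_{index}" if index is not None else ""
--     suffix = f"{component}{index_suffix}_{axis}"
--     results = [suffix]
--     prefix = ""
--     for part in reversed(context_chain):
--         prefix = part + "_" + prefix
--         results.append(prefix + suffix)
--     results.reverse()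
--     return results
-- ===== Notes on version B (the rewrite author's own statement) =====
-- stated objective: alternative
-- what changed: Instead of re-slicing context_chain[i:] and re-joining it for every i, B walks the chain once from the back, growing a running prefix by prepending 'part_' each step, collects the names and reverses them at the end.
import Mathlib
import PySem

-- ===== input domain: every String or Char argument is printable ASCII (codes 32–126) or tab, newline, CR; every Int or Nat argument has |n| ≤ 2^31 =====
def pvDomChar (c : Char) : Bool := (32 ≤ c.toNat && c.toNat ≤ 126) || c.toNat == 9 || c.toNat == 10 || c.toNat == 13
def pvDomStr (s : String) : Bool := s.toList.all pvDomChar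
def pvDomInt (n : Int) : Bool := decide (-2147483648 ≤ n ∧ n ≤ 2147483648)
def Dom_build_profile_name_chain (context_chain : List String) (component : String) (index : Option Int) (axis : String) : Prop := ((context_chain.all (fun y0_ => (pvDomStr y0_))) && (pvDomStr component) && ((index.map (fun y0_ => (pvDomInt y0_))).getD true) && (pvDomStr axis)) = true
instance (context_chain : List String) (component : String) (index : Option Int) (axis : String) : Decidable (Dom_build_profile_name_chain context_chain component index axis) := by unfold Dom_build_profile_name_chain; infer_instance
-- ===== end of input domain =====

-- B replaces A's per-index slice-and-join with one back-to-front pass growing a running prefix (alternative decomposition; return values proved equal).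

-- ===== PORT A =====
def build_profile_name_chain (context_chain : List String) (component : String) (index : Option Int) (axis : String) : List String :=
  let index_suffix := match index with
    | some i => "_" ++ PySem.Int.toStr i
    | none => ""
  let axis_suffix := "_" ++ axis
  (PySem.List.pyRange 0 ((context_chain.length : Int) + 1) 1).foldl
    (fun names i =>
      let prefix_parts := PySem.List.slice context_chain (some i) none
      let pfx := if prefix_parts ≠ [] then PySem.Str.join "_" prefix_parts ++ "_" else ""
      names ++ [pfx ++ component ++ index_suffix ++ axis_suffix])
    []

-- ===== PORT B =====
def build_profile_name_chain_alt (context_chain : List String) (component : String) (index : Option Int) (axis : String) : List String :=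
  let index_suffix := match index with
    | some i => "_" ++ PySem.Int.toStr i
    | none => ""
  let suffix := component ++ index_suffix ++ "_" ++ axis
  let res := context_chain.reverse.foldl
    (fun (acc : List String × String) part =>
      let pfx := part ++ "_" ++ acc.2
      (acc.1 ++ [pfx ++ suffix], pfx))
    ([suffix], "")
  res.1.reverse

-- ===== PRECONDITION & SPEC =====
def Spec_build_profile_name_chain (context_chain : List String) (component : String) (index : Option Int) (axis : String) (out : List String) : Prop := out = build_profile_name_chain_alt context_chain component index axis
instance (context_chain : List String) (component : String) (index : Option Int) (axis : String) (out : List String) : Decidable (Spec_build_profile_name_chain context_chain component index axis out) := by unfold Spec_build_profile_name_chain; infer_instance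

-- ===== CLAIM (what is proved, stated in full; the proofs are below) =====
def Claim_equal_build_profile_name_chain : Prop := ∀ (context_chain : List String) (component : String) (index : Option Int) (axis : String), Dom_build_profile_name_chain context_chain component index axis → Spec_build_profile_name_chain context_chain component index axis (build_profile_name_chain context_chain component index axis)

-- ===== LEMMAS AND PROOFS =====

/-- The running prefix B maintains: `c0_c1_..._ck_` for the parts still in the chain. -/
def pvPrefix : List String → String
  | [] => ""
  | h :: t => h ++ "_" ++ pvPrefix t

/-- The common specification: the fallback names from the full chain down to the bare suffix. -/
def pvSpec (sfx : String) : List String → List String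
  | [] => [sfx]
  | h :: t => ((h ++ "_" ++ pvPrefix t) ++ sfx) :: pvSpec sfx t

theorem pv_join_cons (h : String) (t : List String) (ht : t ≠ []) :
    PySem.Str.join "_" (h :: t) = h ++ "_" ++ PySem.Str.join "_" t := by
  apply String.toList_inj.mp
  cases t with
  | nil => exact absurd rfl ht
  | cons q r =>
    simp only [String.toList_append, PySem.Str.toList_join, List.map_cons]
    rw [PySem.Chars.join_cons_cons]

theorem pv_prefix_eq (l : List String) (hl : l ≠ []) :
    PySem.Str.join "_" l ++ "_" = pvPrefix l := by
  induction l with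
  | nil => exact absurd rfl hl
  | cons h t ih =>
    cases t with
    | nil => simp [pvPrefix, PySem.Str.join]
    | cons q r =>
      rw [pv_join_cons h (q :: r) (by simp), String.append_assoc, ih (by simp)]
      rfl

theorem pv_foldl_append_map {α β : Type} (f : α → β) :
    ∀ (l : List α) (init : List β),
      l.foldl (fun ns i => ns ++ [f i]) init = init ++ l.map f := by
  intro l
  induction l with
  | nil => simp
  | cons h t ih => intro init; simp [List.foldl_cons, ih]

theorem pv_map_range_spec (sfx : String) (g : List String → String)
    (hg : ∀ l, g l = pvPrefix l ++ sfx) :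
    ∀ (cc : List String),
      (List.range (cc.length + 1)).map (fun k => g (cc.drop k)) = pvSpec sfx cc := by
  intro cc
  induction cc with
  | nil => simp [pvSpec, hg, pvPrefix]
  | cons h t ih =>
    rw [List.range_succ_eq_map]
    simp only [List.map_cons, List.drop_zero, List.map_map, pvSpec, List.cons.injEq]
    refine ⟨by rw [hg]; rfl, ?_⟩
    rw [← ih]
    rfl

theorem pv_B_fold (sfx : String) :
    ∀ (cc : List String),
      cc.reverse.foldl
        (fun (acc : List String × String) part =>
          (acc.1 ++ [(part ++ "_" ++ acc.2) ++ sfx], part ++ "_" ++ acc.2))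
        ([sfx], "") = ((pvSpec sfx cc).reverse, pvPrefix cc) := by
  intro cc
  induction cc with
  | nil => simp [pvSpec, pvPrefix]
  | cons h t ih =>
    rw [List.reverse_cons, List.foldl_append, ih]
    simp [pvSpec, pvPrefix]

theorem pv_main (cc : List String) (comp isfx axis : String) :
    (PySem.List.pyRange 0 ((cc.length : Int) + 1) 1).foldl
      (fun names i =>
        names ++ [(if PySem.List.slice cc (some i) none ≠ [] then
            PySem.Str.join "_" (PySem.List.slice cc (some i) none) ++ "_" else "") ++
            comp ++ isfx ++ ("_" ++ axis)])
      [] =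
    ((cc.reverse.foldl
        (fun (acc : List String × String) part =>
          ((acc.1 ++ [(part ++ "_" ++ acc.2) ++ (comp ++ isfx ++ "_" ++ axis)]),
            part ++ "_" ++ acc.2))
        ([comp ++ isfx ++ "_" ++ axis], "")).1).reverse := by
  rw [pv_B_fold (comp ++ isfx ++ "_" ++ axis) cc, List.reverse_reverse,
    pv_foldl_append_map (fun i => (if PySem.List.slice cc (some i) none ≠ [] then
      PySem.Str.join "_" (PySem.List.slice cc (some i) none) ++ "_" else "") ++
      comp ++ isfx ++ ("_" ++ axis)),
    List.nil_append]
  have hcast : PySem.List.pyRange 0 ((cc.length : Int) + 1) 1 =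
      (List.range (cc.length + 1)).map (fun k : ℕ => (k : Int)) := by
    rw [show ((cc.length : Int) + 1) = ((cc.length + 1 : ℕ) : Int) by push_cast; ring]
    exact PySem.List.pyRange_zero_natCast (cc.length + 1)
  rw [hcast, List.map_map]
  have hfn : ((fun i => (if PySem.List.slice cc (some i) none ≠ [] then
        PySem.Str.join "_" (PySem.List.slice cc (some i) none) ++ "_" else "") ++
        comp ++ isfx ++ ("_" ++ axis)) ∘ (fun k : ℕ => (k : Int))) =
      fun k : ℕ => (fun l => (if l ≠ [] then PySem.Str.join "_" l ++ "_" else "") ++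
        comp ++ isfx ++ ("_" ++ axis)) (cc.drop k) := by
    funext k
    simp only [Function.comp_apply, PySem.List.slice_from_natCast]
  rw [hfn]
  refine pv_map_range_spec (comp ++ isfx ++ "_" ++ axis)
    (fun l => (if l ≠ [] then PySem.Str.join "_" l ++ "_" else "") ++
      comp ++ isfx ++ ("_" ++ axis)) ?_ cc
  intro l
  cases l with
  | nil =>
    simp [pvPrefix, String.empty_append, String.append_assoc]
  | cons a b =>
    have hne : (a :: b) ≠ ([] : List String) := by simp
    simp only [if_pos hne]
    rw [pv_prefix_eq (a :: b) hne]
    simp only [String.append_assoc]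

-- ===== VERDICT (by name: the statement is the Claim_ definition above) =====
theorem build_profile_name_chain_spec : Claim_equal_build_profile_name_chain := by
  intro cc comp index axis _
  unfold Spec_build_profile_name_chain build_profile_name_chain build_profile_name_chain_alt
  cases index with
  | none => exact pv_main cc comp "" axis
  | some i => exact pv_main cc comp ("_" ++ PySem.Int.toStr i) axis
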